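-- pv_equiv track=rewrite | github.com/airlog/flavority-api | bot/recipes.py | get_package
-- ===== SOURCE A (Python) =====
-- def get_package(text, packageSize = 1, skip = 0, limit = None):
-- 	counter, parsed, package = 0, 0, []
-- 	for line in text.splitlines():
-- 		counter += 1
-- 		if skip is not None and counter <= skip: continue
-- 		elif limit is not None and parsed >= limit: break
--
-- 		package.append(line)
-- 		if packageSize is not None and len(package) == packageSize:
-- 			yield package
-- 			package = []
-- 		parsed += 1
-- 	if len(package) > 0: yield package
-- ===== SOURCE B (Python) =====
-- def get_package(text, packageSize = 1, skip = 0, limit = None):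
-- 	selected = text.splitlines()
-- 	if skip is not None and skip > 0:
-- 		selected = selected[skip:]
-- 	if limit is not None:
-- 		selected = selected[:limit if limit > 0 else 0]
-- 	if packageSize is None or packageSize <= 0:
-- 		if selected:
-- 			yield selected
-- 		return
-- 	while selected:
-- 		yield selected[:packageSize]
-- 		selected = selected[packageSize:]
-- ===== Notes on version B (the rewrite author's own statement) =====
-- stated objective: simpler
-- what changed: Replaces the per-line counter/parsed/package streaming loop with a slice-based pipeline: splitlines once, apply skip and limit as list slices, then repeatedly slice off packageSize-sized chunks.
import Mathlib
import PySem

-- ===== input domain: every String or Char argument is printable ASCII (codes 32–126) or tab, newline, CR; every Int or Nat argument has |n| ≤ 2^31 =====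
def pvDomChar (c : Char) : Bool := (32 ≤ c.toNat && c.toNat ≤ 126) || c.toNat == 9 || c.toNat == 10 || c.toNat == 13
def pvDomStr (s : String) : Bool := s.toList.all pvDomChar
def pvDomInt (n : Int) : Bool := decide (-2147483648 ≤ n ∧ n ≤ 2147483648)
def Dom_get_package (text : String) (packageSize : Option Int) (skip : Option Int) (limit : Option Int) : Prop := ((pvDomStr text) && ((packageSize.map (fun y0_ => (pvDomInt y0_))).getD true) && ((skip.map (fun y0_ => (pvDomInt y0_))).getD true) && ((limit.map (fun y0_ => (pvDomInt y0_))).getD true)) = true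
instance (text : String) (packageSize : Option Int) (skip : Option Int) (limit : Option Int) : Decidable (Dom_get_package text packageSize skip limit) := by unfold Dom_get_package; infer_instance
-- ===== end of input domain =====

-- B replaces A's per-line counter/parsed/package streaming loop by slices: splitlines once,
-- apply skip/limit as list slices, then peel off packageSize-sized chunks (objective: simpler).
-- Both Pythons are generators; equivalence is about the list of yielded packages.

-- ===== PORT A =====
-- the generator loop of A: state (counter, parsed, package, yielded-so-far); break on limit;
-- the final `if len(package) > 0: yield package` runs both at list end and after the break
def goA (packageSize limit skip : Option Int) : List String → Int → Int → List String → List (List String) → List (List String)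
  | [], _, _, pkg, out => if pkg.length > 0 then out ++ [pkg] else out
  | line :: rest, counter, parsed, pkg, out =>
    let c := counter + 1
    if skip.any (fun s => decide (c ≤ s)) then
      goA packageSize limit skip rest c parsed pkg out
    else if limit.any (fun l => decide (parsed ≥ l)) then
      (if pkg.length > 0 then out ++ [pkg] else out)
    else
      let pkg' := pkg ++ [line]
      if packageSize.any (fun p => decide ((pkg'.length : Int) = p)) then
        goA packageSize limit skip rest c (parsed + 1) [] (out ++ [pkg'])
      else
        goA packageSize limit skip rest c (parsed + 1) pkg' out

def get_package (text : String) (packageSize : Option Int) (skip : Option Int) (limit : Option Int) : List (List String) :=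
  goA packageSize limit skip (PySem.Str.splitlines text) 0 0 [] []

-- ===== PORT B =====
-- Source B's `while selected: yield selected[:p]; selected = selected[p:]`; only called with p ≥ 1,
-- where selected[p:] on a :: rest is rest.drop (p-1) — phrased that way so the recursion visibly shrinks
def chunkB (p : Nat) : List String → List (List String)
  | [] => []
  | a :: rest => ((a :: rest).take p) :: chunkB p (rest.drop (p - 1))
  termination_by l => l.length
  decreasing_by simp [List.length_drop]

def get_package_alt (text : String) (packageSize : Option Int) (skip : Option Int) (limit : Option Int) : List (List String) :=
  let selected := PySem.Str.splitlines text
  let selected := match skip with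
    | some s => if s > 0 then PySem.List.slice selected (some s) none else selected
    | none => selected
  let selected := match limit with
    | some l => PySem.List.slice selected none (some (if l > 0 then l else 0))
    | none => selected
  match packageSize with
  | none => if selected.isEmpty then [] else [selected]
  | some p => if p ≤ 0 then (if selected.isEmpty then [] else [selected]) else chunkB p.toNat selected

-- ===== PRECONDITION & SPEC =====
def Spec_get_package (text : String) (packageSize : Option Int) (skip : Option Int) (limit : Option Int) (out : List (List String)) : Prop := out = get_package_alt text packageSize skip limit
instance (text : String) (packageSize : Option Int) (skip : Option Int) (limit : Option Int) (out : List (List String)) : Decidable (Spec_get_package text packageSize skip limit out) := by unfold Spec_get_package; infer_instance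

-- ===== CLAIM (what is proved, stated in full; the proofs are below) =====
def Claim_equal_get_package : Prop := ∀ (text : String) (packageSize : Option Int) (skip : Option Int) (limit : Option Int), Dom_get_package text packageSize skip limit → Spec_get_package text packageSize skip limit (get_package text packageSize skip limit)

-- ===== LEMMAS AND PROOFS =====

-- A's loop once the skip phase is over (counter no longer matters)
def goA2 (packageSize limit : Option Int) : List String → Int → List String → List (List String) → List (List String)
  | [], _, pkg, out => if pkg.length > 0 then out ++ [pkg] else out
  | line :: rest, parsed, pkg, out =>
    if limit.any (fun l => decide (parsed ≥ l)) then
      (if pkg.length > 0 then out ++ [pkg] else out)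
    else
      let pkg' := pkg ++ [line]
      if packageSize.any (fun p => decide ((pkg'.length : Int) = p)) then
        goA2 packageSize limit rest (parsed + 1) [] (out ++ [pkg'])
      else
        goA2 packageSize limit rest (parsed + 1) pkg' out

-- A's loop with skip and limit both discharged: pure chunking
def goA3 (packageSize : Option Int) : List String → List String → List (List String) → List (List String)
  | [], pkg, out => if pkg.length > 0 then out ++ [pkg] else out
  | line :: rest, pkg, out =>
    let pkg' := pkg ++ [line]
    if packageSize.any (fun p => decide ((pkg'.length : Int) = p)) then
      goA3 packageSize rest [] (out ++ [pkg'])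
    else
      goA3 packageSize rest pkg' out

-- B's selection pipeline (skip then limit), for stating the phase lemmas
def selSkip (sk : Option Int) (lines : List String) : List String :=
  match sk with
  | some s => if s > 0 then PySem.List.slice lines (some s) none else lines
  | none => lines

def selLim (lim : Option Int) (sel : List String) : List String :=
  match lim with
  | some l => PySem.List.slice sel none (some (if l > 0 then l else 0))
  | none => sel

def selB (sk lim : Option Int) (lines : List String) : List String :=
  selLim lim (selSkip sk lines)

lemma goA_skip_none (ps lim : Option Int) :
    ∀ (lines : List String) (c parsed : Int) (pkg : List String) (out : List (List String)),
      goA ps lim none lines c parsed pkg out = goA2 ps lim lines parsed pkg out := by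
  intro lines
  induction lines with
  | nil => intro c parsed pkg out; simp [goA, goA2]
  | cons line rest ih =>
    intro c parsed pkg out
    simp only [goA, goA2, Option.any, Bool.false_eq_true, if_false]
    split_ifs <;> first | rfl | apply ih

lemma goA_skip_some (ps lim : Option Int) (s : Int) :
    ∀ (lines : List String) (c parsed : Int) (pkg : List String) (out : List (List String)),
      goA ps lim (some s) lines c parsed pkg out
        = goA2 ps lim (lines.drop (s - c).toNat) parsed pkg out := by
  intro lines
  induction lines with
  | nil => intro c parsed pkg out; simp [goA, goA2]
  | cons line rest ih =>
    intro c parsed pkg out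
    by_cases h : c + 1 ≤ s
    · have h1 : (s - c).toNat = (s - (c + 1)).toNat + 1 := by omega
      simp only [goA, Option.any, decide_eq_true_eq]
      rw [if_pos h, ih, h1, List.drop_succ_cons]
    · have h0 : (s - c).toNat = 0 := by omega
      have h0' : (s - (c + 1)).toNat = 0 := by omega
      simp only [goA, goA2, Option.any, decide_eq_true_eq, h0, List.drop_zero]
      rw [if_neg h]
      split_ifs <;> first | rfl | (rw [ih, h0', List.drop_zero])

lemma goA2_lim_none (ps : Option Int) :
    ∀ (lines : List String) (parsed : Int) (pkg : List String) (out : List (List String)),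
      goA2 ps none lines parsed pkg out = goA3 ps lines pkg out := by
  intro lines
  induction lines with
  | nil => intro parsed pkg out; simp [goA2, goA3]
  | cons line rest ih =>
    intro parsed pkg out
    simp only [goA2, goA3, Option.any, Bool.false_eq_true, if_false]
    split_ifs <;> first | rfl | apply ih

lemma goA2_lim_some (ps : Option Int) (l : Int) :
    ∀ (lines : List String) (parsed : Int) (pkg : List String) (out : List (List String)),
      goA2 ps (some l) lines parsed pkg out = goA3 ps (lines.take (l - parsed).toNat) pkg out := by
  intro lines
  induction lines with
  | nil => intro parsed pkg out; simp [goA2, goA3]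
  | cons line rest ih =>
    intro parsed pkg out
    by_cases h : parsed ≥ l
    · have h0 : (l - parsed).toNat = 0 := by omega
      simp only [goA2, Option.any, decide_eq_true_eq, h0, List.take_zero]
      rw [if_pos h]
      simp [goA3]
    · have h1 : (l - parsed).toNat = (l - (parsed + 1)).toNat + 1 := by omega
      simp only [goA2, Option.any, decide_eq_true_eq, h1, List.take_succ_cons, goA3]
      rw [if_neg h]
      split_ifs <;> first | rfl | apply ih

-- A as far as the selection phases go: skip then limit equal B's slice pipeline
lemma goA_selB (ps lim sk : Option Int) (lines : List String) :
    goA ps lim sk lines 0 0 [] [] = goA3 ps (selB sk lim lines) [] [] := by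
  have h1 : goA ps lim sk lines 0 0 [] [] = goA2 ps lim (selSkip sk lines) 0 [] [] := by
    cases sk with
    | none => rw [goA_skip_none]; rfl
    | some s =>
      rw [goA_skip_some]
      show _ = goA2 ps lim (if s > 0 then PySem.List.slice lines (some s) none else lines) 0 [] []
      by_cases hs : s > 0
      · rw [if_pos hs, PySem.List.slice_from _ (by omega)]
        simp
      · rw [if_neg hs]
        have h0 : (s - 0).toNat = 0 := by omega
        rw [h0, List.drop_zero]
  rw [h1]
  cases lim with
  | none => rw [goA2_lim_none]; rfl
  | some l =>
    rw [goA2_lim_some]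
    show goA3 ps (List.take (l - 0).toNat (selSkip sk lines)) [] []
        = goA3 ps (PySem.List.slice (selSkip sk lines) none (some (if l > 0 then l else 0))) [] []
    by_cases hl : l > 0
    · rw [if_pos hl, PySem.List.slice_to _ (by omega)]
      simp
    · rw [if_neg hl, PySem.List.slice_to _ (by omega)]
      have h0 : l.toNat = 0 := by omega
      simp [h0]

-- B expressed through selB (the let-chains are definitionally the same pipeline)
lemma alt_eq (text : String) (ps sk lim : Option Int) :
    get_package_alt text ps sk lim =
      match ps with
      | none => if (selB sk lim (PySem.Str.splitlines text)).isEmpty then []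
                else [selB sk lim (PySem.Str.splitlines text)]
      | some p => if p ≤ 0 then
                    (if (selB sk lim (PySem.Str.splitlines text)).isEmpty then []
                     else [selB sk lim (PySem.Str.splitlines text)])
                  else chunkB p.toNat (selB sk lim (PySem.Str.splitlines text)) := rfl

-- packageSize None or ≤ 0: A's inner yield never fires, everything accumulates into one package
lemma goA3_one_package (ps : Option Int) (hps : ∀ p, ps = some p → p ≤ 0) :
    ∀ (lines : List String) (pkg : List String) (out : List (List String)),
      goA3 ps lines pkg out
        = if (pkg ++ lines).length > 0 then out ++ [pkg ++ lines] else out := by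
  intro lines
  induction lines with
  | nil => intro pkg out; simp [goA3]
  | cons line rest ih =>
    intro pkg out
    have hcond : ps.any (fun p => decide (((pkg ++ [line]).length : Int) = p)) = false := by
      cases ps with
      | none => rfl
      | some p =>
        have := hps p rfl
        simp only [Option.any, decide_eq_false_iff_not]
        intro hc
        simp only [List.length_append, List.length_singleton] at hc
        omega
    simp only [goA3, hcond, Bool.false_eq_true, if_false, ih]
    simp

lemma chunkB_cons_eq (p : Nat) (hp : 1 ≤ p) (l : List String) (hl : l ≠ []) :
    chunkB p l = l.take p :: chunkB p (l.drop p) := by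
  cases l with
  | nil => exact absurd rfl hl
  | cons a rest =>
    have hd : (a :: rest).drop p = rest.drop (p - 1) := by
      obtain ⟨q, rfl⟩ : ∃ q, p = q + 1 := ⟨p - 1, by omega⟩
      simp [List.drop_succ_cons]
    rw [hd, chunkB]

-- positive packageSize: A's fill-and-flush loop produces exactly B's chunks
lemma goA3_chunks (p : Int) (hp : 0 < p) :
    ∀ (lines : List String) (pkg : List String) (out : List (List String)),
      pkg.length < p.toNat →
      goA3 (some p) lines pkg out = out ++ chunkB p.toNat (pkg ++ lines) := by
  intro lines
  induction lines with
  | nil =>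
    intro pkg out hlen
    cases hpkg : pkg with
    | nil => simp [goA3, chunkB]
    | cons a t =>
      subst hpkg
      have htake : (a :: t).take p.toNat = a :: t :=
        List.take_of_length_le (by omega)
      have hdrop : t.drop (p.toNat - 1) = [] := by
        apply List.drop_eq_nil_of_le
        simp only [List.length_cons] at hlen
        omega
      simp [goA3, chunkB, htake, hdrop]
  | cons line rest ih =>
    intro pkg out hlen
    have hplen : (pkg ++ [line]).length = pkg.length + 1 := by simp
    by_cases h : (pkg ++ [line]).length = p.toNat
    · simp only [goA3, Option.any, decide_eq_true_eq]
      rw [if_pos (show (((pkg ++ [line]).length : Int)) = p by omega)]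
      rw [ih [] (out ++ [pkg ++ [line]]) (by simpa using hp)]
      rw [List.nil_append]
      rw [show pkg ++ line :: rest = (pkg ++ [line]) ++ rest by simp]
      rw [chunkB_cons_eq p.toNat (by omega) ((pkg ++ [line]) ++ rest) (by simp)]
      rw [List.take_left' h, List.drop_left' h]
      simp
    · simp only [goA3, Option.any, decide_eq_true_eq]
      rw [if_neg (show ¬(((pkg ++ [line]).length : Int)) = p by omega)]
      rw [ih (pkg ++ [line]) out (by omega)]
      simp

-- ===== VERDICT (by name: the statement is the Claim_ definition above) =====
theorem get_package_spec : Claim_equal_get_package := by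
  intro text ps sk lim _
  unfold Spec_get_package get_package
  rw [goA_selB, alt_eq]
  generalize selB sk lim (PySem.Str.splitlines text) = sel
  cases ps with
  | none =>
    rw [goA3_one_package none (by intro p hp; cases hp)]
    cases sel <;> simp
  | some p =>
    by_cases hp : p ≤ 0
    · rw [goA3_one_package (some p) (by intro q hq; cases hq; exact hp)]
      cases sel <;> simp [hp]
    · rw [goA3_chunks p (by omega) sel [] [] (by simp; omega)]
      simp [hp]
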